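-- pv_equiv track=rewrite | github.com/KWONDU/mtr-lftqa-dataset | construct_source_openwikitable_dataset/construct_gold_table_set.py | decompose_to_3x_4y_with_min_diff
-- ===== SOURCE A (Python) =====
-- def decompose_to_3x_4y_with_min_diff(n):
--     best_x, best_y = None, None
--     min_diff = float('inf')
--
--     for x in range(n // 3 + 1):
--         for y in range(n // 4 + 1):
--             if 3 * x + 4 * y == n:
--                 diff = abs(x - y)
--                 if diff < min_diff:
--                     best_x, best_y = x, y
--                     min_diff = diff
--
--     return best_x, best_y
-- ===== SOURCE B (Python) =====
-- def decompose_to_3x_4y_with_min_diff(n):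
--     # Closed form, no loop. A solution pair corresponds to an x >= 0 with
--     # 3x <= n and 4 | n - 3x, i.e. x ≡ 3n (mod 4); its diff |x-y| = |7x-n|/4
--     # is convex in x, so the minimizer is the unconstrained one clamped into
--     # the feasible interval, and it is unique in its residue class.
--     x0 = (3 * n) % 4                 # the feasible residue class of x mod 4
--     if x0 > n // 3:
--         return None, None            # no feasible x at all
--     k_max = (n // 3 - x0) // 4       # feasible x = x0 + 4k, 0 <= k <= k_max
--     k0 = (n - 7 * x0 + 14) // 28     # unconstrained argmin of |7(x0+4k)-n|
--     k = min(max(k0, 0), k_max)       # clamp (convexity => still the argmin)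
--     x = x0 + 4 * k
--     y = (n - 3 * x) // 4
--     return x, y
-- ===== Notes on version B (the rewrite author's own statement) =====
-- stated objective: faster
-- what changed: Replaced A's quadratic double scan by a loop-free closed form: solve the congruence x ≡ 3n (mod 4) and clamp the unconstrained minimizer of the convex |7x-n| into the feasible interval.
import Mathlib
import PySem

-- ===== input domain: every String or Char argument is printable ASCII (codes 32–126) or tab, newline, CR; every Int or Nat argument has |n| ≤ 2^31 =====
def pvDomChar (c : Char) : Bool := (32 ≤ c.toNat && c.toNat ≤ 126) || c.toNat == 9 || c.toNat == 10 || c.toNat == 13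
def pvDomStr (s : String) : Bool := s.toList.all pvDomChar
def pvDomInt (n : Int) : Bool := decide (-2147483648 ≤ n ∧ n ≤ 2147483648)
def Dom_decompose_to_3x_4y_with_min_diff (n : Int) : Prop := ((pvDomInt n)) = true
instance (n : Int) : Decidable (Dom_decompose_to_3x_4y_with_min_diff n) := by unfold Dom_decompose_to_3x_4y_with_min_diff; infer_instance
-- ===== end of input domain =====

-- B replaces A's O(n^2) nested scan by a loop-free closed form (objective: faster):
-- a solution pair is an x with 0 ≤ 3x ≤ n and x ≡ 3n (mod 4); its diff |7x-n|/4 is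
-- convex in x, so B clamps the unconstrained minimizer into the feasible interval.

-- ===== PORT A =====
-- state (best_x, best_y, min_diff); min_diff = none models float('inf')
-- 'diff < min_diff' with min_diff = inf is always true
def pvLtInf (d : Int) (md : Option Int) : Bool :=
  match md with
  | none => true
  | some m => decide (d < m)

def pvStepA (n x : Int) (s : Option Int × Option Int × Option Int) (y : Int) :
    Option Int × Option Int × Option Int :=
  if 3 * x + 4 * y = n then
    let diff := |x - y|
    if pvLtInf diff s.2.2 then (some x, some y, some diff) else s
  else s

def decompose_to_3x_4y_with_min_diff (n : Int) : Option Int × Option Int :=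
  let s := (PySem.List.pyRange 0 (PySem.Int.floordiv n 3 + 1) 1).foldl
    (fun s x => (PySem.List.pyRange 0 (PySem.Int.floordiv n 4 + 1) 1).foldl (pvStepA n x) s)
    (none, none, none)
  (s.1, s.2.1)

-- ===== PORT B =====
def decompose_to_3x_4y_with_min_diff_alt (n : Int) : Option Int × Option Int :=
  let x0 := PySem.Int.mod (3 * n) 4
  if x0 > PySem.Int.floordiv n 3 then (none, none)
  else
    let kmax := PySem.Int.floordiv (PySem.Int.floordiv n 3 - x0) 4
    let k0 := PySem.Int.floordiv (n - 7 * x0 + 14) 28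
    let k := min (max k0 0) kmax
    let x := x0 + 4 * k
    (some x, some (PySem.Int.floordiv (n - 3 * x) 4))

-- ===== PRECONDITION & SPEC =====
def Spec_decompose_to_3x_4y_with_min_diff (n : Int) (out : Option Int × Option Int) : Prop := out = decompose_to_3x_4y_with_min_diff_alt n
instance (n : Int) (out : Option Int × Option Int) : Decidable (Spec_decompose_to_3x_4y_with_min_diff n out) := by unfold Spec_decompose_to_3x_4y_with_min_diff; infer_instance

-- ===== CLAIM (what is proved, stated in full; the proofs are below) =====
def Claim_equal_decompose_to_3x_4y_with_min_diff : Prop := ∀ (n : Int), Dom_decompose_to_3x_4y_with_min_diff n → Spec_decompose_to_3x_4y_with_min_diff n (decompose_to_3x_4y_with_min_diff n)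

-- ===== LEMMAS AND PROOFS =====

-- proof-only single-loop step: A's inner scan over y collapses to this (pv_inner_eq)
def pvStep1 (n : Int) (s : Option Int × Option Int × Option Int) (x : Int) :
    Option Int × Option Int × Option Int :=
  let r := n - 3 * x
  if PySem.Int.mod r 4 = 0 then
    let y := PySem.Int.floordiv r 4
    let diff := |x - y|
    if pvLtInf diff s.2.2 then (some x, some y, some diff) else s
  else s

def pvY (n w : Int) : Int := PySem.Int.floordiv (n - 3 * w) 4
def pvD (n w : Int) : Int := |w - pvY n w|
def pvSt (n z : Int) : Option Int × Option Int × Option Int :=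
  (some z, some (pvY n z), some (pvD n z))

-- a fold whose function fixes every element of the list is the identity
theorem pv_foldl_id {α β : Type} (f : β → α → β) (l : List α)
    (h : ∀ s, ∀ x ∈ l, f s x = s) (s : β) : l.foldl f s = s := by
  induction l generalizing s with
  | nil => rfl
  | cons a t ih =>
    simp only [List.foldl_cons, h s a (List.mem_cons_self)]
    exact ih (fun s x hx => h s x (List.mem_cons_of_mem _ hx)) s

-- a fold that fixes one particular state stays at that state
theorem pv_foldl_fix {α β : Type} (f : β → α → β) (l : List α) (b : β)
    (h : ∀ x ∈ l, f b x = b) : l.foldl f b = b := by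
  induction l with
  | nil => rfl
  | cons a t ih =>
    rw [List.foldl_cons, h a (List.mem_cons_self)]
    exact ih (fun x hx => h x (List.mem_cons_of_mem _ hx))

-- a fold over a nodup list where only y0 acts collapses to a single action
theorem pv_foldl_single {β : Type} (f : β → Int → β) (g : β → β) (l : List Int) (y0 : Int)
    (hnd : l.Nodup)
    (hid : ∀ s, ∀ y ∈ l, y ≠ y0 → f s y = s)
    (hg : ∀ s, f s y0 = g s) (s : β) :
    l.foldl f s = if y0 ∈ l then g s else s := by
  induction l generalizing s with
  | nil => simp
  | cons a t ih =>
    rcases List.nodup_cons.mp hnd with ⟨ha, hndt⟩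
    by_cases hay : a = y0
    · subst hay
      simp only [List.foldl_cons, hg, List.mem_cons, true_or, if_true]
      exact pv_foldl_id f t
        (fun s y hy => hid s y (List.mem_cons_of_mem _ hy) (fun h => ha (h ▸ hy))) (g s)
    · simp only [List.foldl_cons, hid s a (List.mem_cons_self) hay]
      rw [ih hndt (fun s y hy hne => hid s y (List.mem_cons_of_mem _ hy) hne) s]
      simp [List.mem_cons, Ne.symm hay]

-- A's inner scan over y equals the single-loop step, for any x the outer loop visits
theorem pv_inner_eq (n x : Int) (hx0 : 0 ≤ x)
    (hx : x ≤ PySem.Int.floordiv n 3)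
    (s : Option Int × Option Int × Option Int) :
    (PySem.List.pyRange 0 (PySem.Int.floordiv n 4 + 1) 1).foldl (pvStepA n x) s
      = pvStep1 n s x := by
  have h3 : (0:Int) < 3 := by norm_num
  have h4 : (0:Int) < 4 := by norm_num
  have hr0 : 0 ≤ n - 3 * x := by
    have := (PySem.Int.le_floordiv_iff_mul_le (a := n) (q := x) h3).mp hx
    omega
  by_cases hdvd : (4:Int) ∣ (n - 3 * x)
  · -- divisible: the unique hit is y0 = (n-3x)/4
    set y0 : Int := PySem.Int.floordiv (n - 3 * x) 4 with hy0
    have hy0e : y0 = (n - 3 * x) / 4 := by rw [hy0, PySem.Int.floordiv_eq_ediv_of_pos h4]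
    have hy0eq : 4 * y0 = n - 3 * x := by
      rw [hy0e]; exact Int.mul_ediv_cancel' hdvd
    have hmem : y0 ∈ PySem.List.pyRange 0 (PySem.Int.floordiv n 4 + 1) 1 := by
      rw [PySem.List.mem_pyRange_one]
      constructor
      · omega
      · have : y0 ≤ PySem.Int.floordiv n 4 := by
          rw [(PySem.Int.le_floordiv_iff_mul_le (a := n) (q := y0) h4)]
          omega
        omega
    rw [pv_foldl_single (pvStepA n x)
      (fun s => if pvLtInf |x - y0| s.2.2 then (some x, some y0, some |x - y0|) else s)
      _ y0 (PySem.List.nodup_pyRange_one _ _)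
      (fun s y _ hne => by
        have : ¬ (3 * x + 4 * y = n) := by
          intro h; exact hne (by omega)
        simp [pvStepA, this])
      (fun s => by simp [pvStepA]; omega) s]
    rw [if_pos hmem]
    have hmod : PySem.Int.mod (n - 3 * x) 4 = 0 :=
      (PySem.Int.mod_eq_zero_iff_dvd _ _).mpr hdvd
    simp only [pvStep1]
    rw [if_pos hmod, ← hy0]
  · -- not divisible: no y hits, both sides are s
    have hmod : ¬ PySem.Int.mod (n - 3 * x) 4 = 0 := by
      intro h; exact hdvd ((PySem.Int.mod_eq_zero_iff_dvd _ _).mp h)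
    rw [pv_foldl_id (pvStepA n x) _
      (fun s y _ => by
        have : ¬ (3 * x + 4 * y = n) := by
          intro h; exact hdvd ⟨y, by omega⟩
        simp [pvStepA, this]) s]
    simp only [pvStep1]
    rw [if_neg hmod]

-- the single-loop fold picks the unique strict minimizer z, if one exists in l
theorem pv_fold_pick (n z : Int)
    (hz : PySem.Int.mod (n - 3 * z) 4 = 0) :
    ∀ (l : List Int) (s : Option Int × Option Int × Option Int),
      z ∈ l →
      (∀ w ∈ l, PySem.Int.mod (n - 3 * w) 4 = 0 → w = z ∨ pvD n z < pvD n w) →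
      (s.2.2 = none ∨ ∃ m, s.2.2 = some m ∧ pvD n z < m) →
      l.foldl (pvStep1 n) s = pvSt n z := by
  intro l
  induction l with
  | nil => intro s hmem; exact absurd hmem (List.not_mem_nil)
  | cons a t ih =>
    intro s hmem hmin hinv
    by_cases haz : a = z
    · subst haz
      have hlt : pvLtInf |a - PySem.Int.floordiv (n - 3 * a) 4| s.2.2 = true := by
        rcases hinv with h | ⟨m, hm, hl⟩
        · rw [h]; rfl
        · simp only [pvD, pvY] at hl
          rw [hm]
          exact decide_eq_true hl
      have hstep : pvStep1 n s a = pvSt n a := by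
        simp only [pvStep1, pvSt, pvY, pvD]
        rw [if_pos hz, if_pos hlt]
      rw [List.foldl_cons, hstep]
      apply pv_foldl_fix
      intro w hw
      by_cases hhit : PySem.Int.mod (n - 3 * w) 4 = 0
      · have hnlt : ¬ (pvD n w < pvD n a) := by
          rcases hmin w (List.mem_cons_of_mem _ hw) hhit with h | h
          · rw [h]; exact lt_irrefl _
          · exact fun hc => lt_asymm h hc
        have hfalse : pvLtInf |w - PySem.Int.floordiv (n - 3 * w) 4| (pvSt n a).2.2 = false := by
          simp only [pvD, pvY] at hnlt
          simp only [pvSt, pvLtInf, pvD, pvY]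
          exact decide_eq_false hnlt
        simp only [pvStep1]
        rw [if_pos hhit, hfalse]
        rfl
      · simp only [pvStep1]
        rw [if_neg hhit]
    · have hzt : z ∈ t := (List.mem_cons.mp hmem).resolve_left (fun h => haz h.symm)
      rw [List.foldl_cons]
      apply ih (pvStep1 n s a) hzt
        (fun w hw hh => hmin w (List.mem_cons_of_mem _ hw) hh)
      -- invariant is preserved by the step on a
      by_cases hhit : PySem.Int.mod (n - 3 * a) 4 = 0
      · have hda : pvD n z < pvD n a :=
          (hmin a (List.mem_cons_self) hhit).resolve_left haz
        simp only [pvStep1]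
        rw [if_pos hhit]
        by_cases hb : pvLtInf |a - PySem.Int.floordiv (n - 3 * a) 4| s.2.2 = true
        · rw [if_pos hb]
          right
          refine ⟨_, rfl, ?_⟩
          simpa only [pvD, pvY] using hda
        · rw [if_neg hb]; exact hinv
      · simp only [pvStep1]
        rw [if_neg hhit]; exact hinv

-- ===== VERDICT (by name: the statement is the Claim_ definition above) =====
theorem decompose_to_3x_4y_with_min_diff_spec : Claim_equal_decompose_to_3x_4y_with_min_diff := by
  intro n _
  unfold Spec_decompose_to_3x_4y_with_min_diff
  unfold decompose_to_3x_4y_with_min_diff decompose_to_3x_4y_with_min_diff_alt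
  have h3 : (0:Int) < 3 := by norm_num
  have h4 : (0:Int) < 4 := by norm_num
  have hM : PySem.Int.floordiv n 3 = n / 3 := PySem.Int.floordiv_eq_ediv_of_pos h3
  have hx0 : PySem.Int.mod (3 * n) 4 = (3 * n) % 4 := PySem.Int.mod_eq_emod_of_pos h4
  -- collapse A's double fold into the single-loop fold
  have hcollapse :
      (PySem.List.pyRange 0 (PySem.Int.floordiv n 3 + 1) 1).foldl
        (fun s x => (PySem.List.pyRange 0 (PySem.Int.floordiv n 4 + 1) 1).foldl (pvStepA n x) s)
        (none, none, none)
      = (PySem.List.pyRange 0 (PySem.Int.floordiv n 3 + 1) 1).foldl (pvStep1 n)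
        (none, none, none) := by
    apply PySem.List.foldl_congr_mem
    intro s x hx
    rcases PySem.List.mem_pyRange_one.mp hx with ⟨hx0, hx1⟩
    exact pv_inner_eq n x hx0 (by omega) s
  simp only [hcollapse]
  by_cases hcase : PySem.Int.mod (3 * n) 4 > PySem.Int.floordiv n 3
  · -- no feasible x: the fold never fires and B returns (none, none)
    rw [if_pos hcase]
    have hfix : (PySem.List.pyRange 0 (PySem.Int.floordiv n 3 + 1) 1).foldl (pvStep1 n)
        (none, none, none) = (none, none, none) := by
      apply pv_foldl_fix
      intro w hw
      rcases PySem.List.mem_pyRange_one.mp hw with ⟨hw0, hw1⟩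
      have hnohit : ¬ PySem.Int.mod (n - 3 * w) 4 = 0 := by
        intro hh
        have hdv : (4:Int) ∣ (n - 3 * w) := (PySem.Int.mod_eq_zero_iff_dvd _ _).mp hh
        rw [hM] at hw1 hcase
        rw [hx0] at hcase
        obtain ⟨q, hq⟩ := hdv
        have h43 : (3 * n) % 4 = 3 * n - 4 * (3 * n / 4) := by omega
        have hwc : (4:Int) ∣ (w - (3 * n) % 4) := by omega
        have hwge : (3 * n) % 4 ≤ w := by omega
        omega
      simp only [pvStep1]
      rw [if_neg hnohit]
    rw [hfix]
  · -- feasible: the fold picks exactly B's clamped minimizer z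
    rw [if_neg hcase]
    rw [not_lt] at hcase
    set M := PySem.Int.floordiv n 3 with hMdef
    set c := PySem.Int.mod (3 * n) 4 with hcdef
    set kmax := PySem.Int.floordiv (M - c) 4 with hkmaxdef
    set k0 := PySem.Int.floordiv (n - 7 * c + 14) 28 with hk0def
    set k := min (max k0 0) kmax with hkdef
    set z := c + 4 * k with hzdef
    have hkmax : kmax = (M - c) / 4 := PySem.Int.floordiv_eq_ediv_of_pos h4
    have hk0 : k0 = (n - 7 * c + 14) / 28 := PySem.Int.floordiv_eq_ediv_of_pos (by norm_num)
    -- basic arithmetic facts, all in terms of ediv/emod for omega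
    have hMe : M = n / 3 := hM
    have hce : c = (3 * n) % 4 := hx0
    have hzdvd : (4:Int) ∣ (n - 3 * z) := by omega
    have hzrange : 0 ≤ z ∧ z ≤ M := by omega
    have hzmod : PySem.Int.mod (n - 3 * z) 4 = 0 :=
      (PySem.Int.mod_eq_zero_iff_dvd _ _).mpr hzdvd
    have hpick : (PySem.List.pyRange 0 (M + 1) 1).foldl (pvStep1 n)
        (none, none, none) = pvSt n z := by
      apply pv_fold_pick n z hzmod
      · exact PySem.List.mem_pyRange_one.mpr ⟨hzrange.1, by omega⟩
      · -- strict minimality of z among feasible w in the range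
        intro w hw hwm
        rcases PySem.List.mem_pyRange_one.mp hw with ⟨hw0, hw1⟩
        have hwdvd : (4:Int) ∣ (n - 3 * w) := (PySem.Int.mod_eq_zero_iff_dvd _ _).mp hwm
        by_cases hwz : w = z
        · left; exact hwz
        · right
          have hyw : pvY n w = (n - 3 * w) / 4 := PySem.Int.floordiv_eq_ediv_of_pos h4
          have hyz : pvY n z = (n - 3 * z) / 4 := PySem.Int.floordiv_eq_ediv_of_pos h4
          have h4yw : 4 * pvY n w = n - 3 * w := by
            rw [hyw]; exact Int.mul_ediv_cancel' hwdvd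
          have h4yz : 4 * pvY n z = n - 3 * z := by
            rw [hyz]; exact Int.mul_ediv_cancel' hzdvd
          unfold pvD
          rw [Int.abs_eq_natAbs, Int.abs_eq_natAbs]
          omega
      · left; rfl
    rw [hpick]
    simp only [pvSt, pvY]
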